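-- pv_equiv track=rewrite | github.com/GabrielMmourthe/Code-PYGame | JogoBolivar.py | get_explosion_range
-- ===== SOURCE A (Python) =====
-- def get_explosion_range(bomb_x, bomb_y, walls):
--     #converte a posicao da bomba para o grid de 11x11
--     grid_x = bomb_x // 50
--     grid_y = bomb_y // 50
--
--     #tamanhos maximo para a explosao
--     max_up = grid_y - 1
--     max_down = 11 - grid_y - 2
--     max_left = grid_x - 1
--     max_right = 11 - grid_x - 2
--
--     #verifica a quantidade de blocos disponiveis em cada direção
--     up_range = 0
--     for i in range(1, max_up + 1):
--         if (grid_x, grid_y - i) in walls: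
--             break
--         up_range += 1
--
--     down_range = 0
--     for i in range(1, max_down + 1):
--         if (grid_x, grid_y + i) in walls:
--             break
--         down_range += 1
--
--     left_range = 0
--     for i in range(1, max_left + 1):
--         if (grid_x - i, grid_y) in walls:
--             break
--         left_range += 1
--
--     right_range = 0
--     for i in range(1, max_right + 1):
--         if (grid_x + i, grid_y) in walls:
--             break
--         right_range += 1
--
--     return up_range, down_range, left_range, right_range
-- ===== SOURCE B (Python) =====
-- def get_explosion_range(bomb_x, bomb_y, walls):
--     gx = bomb_x // 50
--     gy = bomb_y // 50
--
--     def reach(limit, dists):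
--         d = min(dists, default=None)
--         if d is None:
--             return max(0, limit)
--         return max(0, min(limit, d - 1))
--
--     up = reach(gy - 1, [gy - wy for (wx, wy) in walls if wx == gx and wy < gy])
--     down = reach(11 - gy - 2, [wy - gy for (wx, wy) in walls if wx == gx and wy > gy])
--     left = reach(gx - 1, [gx - wx for (wx, wy) in walls if wy == gy and wx < gx])
--     right = reach(11 - gx - 2, [wx - gx for (wx, wy) in walls if wy == gy and wx > gx])
--     return up, down, left, right
-- ===== Notes on version B (the rewrite author's own statement) =====
-- stated objective: alternative
-- what changed: Replaces A's four cell-by-cell marching loops over grid positions (each step scanning the walls list) by one pass per direction over the walls list itself: take the minimum wall distance along the ray and clamp it into [0, max reach] with a closed-form max/min.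
import Mathlib
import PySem

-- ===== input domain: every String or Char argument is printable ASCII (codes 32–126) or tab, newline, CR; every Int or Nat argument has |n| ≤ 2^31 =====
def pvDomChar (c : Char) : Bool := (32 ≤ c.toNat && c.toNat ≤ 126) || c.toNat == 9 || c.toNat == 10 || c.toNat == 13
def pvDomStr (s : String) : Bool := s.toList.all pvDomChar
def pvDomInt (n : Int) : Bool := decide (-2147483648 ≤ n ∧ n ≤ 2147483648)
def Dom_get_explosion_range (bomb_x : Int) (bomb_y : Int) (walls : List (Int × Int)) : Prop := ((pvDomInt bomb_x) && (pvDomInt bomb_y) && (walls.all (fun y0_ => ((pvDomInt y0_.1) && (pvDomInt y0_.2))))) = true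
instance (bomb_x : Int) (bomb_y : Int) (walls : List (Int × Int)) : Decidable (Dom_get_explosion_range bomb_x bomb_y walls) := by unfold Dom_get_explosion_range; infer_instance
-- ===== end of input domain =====

-- B: instead of A's cell-by-cell marching loops, one pass per direction over the walls list: the nearest
-- wall distance along the ray (a min over the walls list) clamped into [0, max reach].

-- ===== PORT A =====
-- the body of one of A's 'for i in range(1, m+1): if hit: break; acc += 1' loops
def pvCountUntil (p : Int → Bool) (acc : Int) : List Int → Int
  | [] => acc
  | i :: rest => if p i then acc else pvCountUntil p (acc + 1) rest

def get_explosion_range (bomb_x : Int) (bomb_y : Int) (walls : List (Int × Int)) : Int × Int × Int × Int :=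
  let grid_x := PySem.Int.floordiv bomb_x 50
  let grid_y := PySem.Int.floordiv bomb_y 50
  let max_up := grid_y - 1
  let max_down := 11 - grid_y - 2
  let max_left := grid_x - 1
  let max_right := 11 - grid_x - 2
  let up_range := pvCountUntil (fun i => walls.contains (grid_x, grid_y - i)) 0 (PySem.List.pyRange 1 (max_up + 1) 1)
  let down_range := pvCountUntil (fun i => walls.contains (grid_x, grid_y + i)) 0 (PySem.List.pyRange 1 (max_down + 1) 1)
  let left_range := pvCountUntil (fun i => walls.contains (grid_x - i, grid_y)) 0 (PySem.List.pyRange 1 (max_left + 1) 1)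
  let right_range := pvCountUntil (fun i => walls.contains (grid_x + i, grid_y)) 0 (PySem.List.pyRange 1 (max_right + 1) 1)
  (up_range, down_range, left_range, right_range)

-- ===== PORT B =====
-- 'reach(limit, dists)' from Source B: min(dists, default=None), then clamp
def pvReach (limit : Int) (dists : List Int) : Int :=
  match PySem.List.min? dists (fun x => x) with
  | none => max 0 limit
  | some d => max 0 (min limit (d - 1))

def get_explosion_range_alt (bomb_x : Int) (bomb_y : Int) (walls : List (Int × Int)) : Int × Int × Int × Int :=
  let gx := PySem.Int.floordiv bomb_x 50
  let gy := PySem.Int.floordiv bomb_y 50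
  let up := pvReach (gy - 1) (walls.filterMap (fun w => if w.1 = gx ∧ w.2 < gy then some (gy - w.2) else none))
  let down := pvReach (11 - gy - 2) (walls.filterMap (fun w => if w.1 = gx ∧ gy < w.2 then some (w.2 - gy) else none))
  let left := pvReach (gx - 1) (walls.filterMap (fun w => if w.2 = gy ∧ w.1 < gx then some (gx - w.1) else none))
  let right := pvReach (11 - gx - 2) (walls.filterMap (fun w => if w.2 = gy ∧ gx < w.1 then some (w.1 - gx) else none))
  (up, down, left, right)

-- ===== PRECONDITION & SPEC =====
def Spec_get_explosion_range (bomb_x : Int) (bomb_y : Int) (walls : List (Int × Int)) (out : Int × Int × Int × Int) : Prop := out = get_explosion_range_alt bomb_x bomb_y walls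
instance (bomb_x : Int) (bomb_y : Int) (walls : List (Int × Int)) (out : Int × Int × Int × Int) : Decidable (Spec_get_explosion_range bomb_x bomb_y walls out) := by unfold Spec_get_explosion_range; infer_instance

-- ===== CLAIM (what is proved, stated in full; the proofs are below) =====
def Claim_equal_get_explosion_range : Prop := ∀ (bomb_x : Int) (bomb_y : Int) (walls : List (Int × Int)), Dom_get_explosion_range bomb_x bomb_y walls → Spec_get_explosion_range bomb_x bomb_y walls (get_explosion_range bomb_x bomb_y walls)

-- ===== LEMMAS AND PROOFS =====

-- A's loop when no cell in [a, b) hits: it counts the whole range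
lemma pvCountUntil_no_hit (p : Int → Bool) (acc a b : Int)
    (h : ∀ i, a ≤ i → i < b → p i = false) :
    pvCountUntil p acc (PySem.List.pyRange a b 1) = acc + max 0 (b - a) := by
  by_cases hab : b ≤ a
  · rw [PySem.List.pyRange_one_eq_nil hab]; simp [pvCountUntil]; omega
  · rw [PySem.List.pyRange_one_cons (by omega)]
    simp only [pvCountUntil, h a (le_refl a) (by omega)]
    rw [if_neg (by simp)]
    rw [pvCountUntil_no_hit p (acc+1) (a+1) b (fun i hi₁ hi₂ => h i (by omega) hi₂)]
    omega
termination_by (b - a).toNat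
decreasing_by omega

-- A's loop when d is the first hit in [a, b): it stops after d - a cells
lemma pvCountUntil_hit (p : Int → Bool) (acc a b d : Int)
    (had : a ≤ d) (hdb : d < b) (hp : p d = true)
    (hmin : ∀ i, a ≤ i → i < d → p i = false) :
    pvCountUntil p acc (PySem.List.pyRange a b 1) = acc + (d - a) := by
  rw [PySem.List.pyRange_one_cons (by omega)]
  by_cases hda : d = a
  · subst hda; simp [pvCountUntil, hp]
  · simp only [pvCountUntil, hmin a (le_refl a) (by omega)]
    rw [if_neg (by simp)]
    rw [pvCountUntil_hit p (acc+1) (a+1) b d (by omega) hdb hp (fun i hi₁ hi₂ => hmin i (by omega) hi₂)]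
    omega
termination_by (b - a).toNat
decreasing_by omega

-- one direction: A's marching loop equals B's clamp of the nearest wall distance
lemma pv_dir (p : Int → Bool) (m : Int) (S : List Int)
    (hS : ∀ i, i ∈ S ↔ (1 ≤ i ∧ p i = true)) :
    pvCountUntil p 0 (PySem.List.pyRange 1 (m + 1) 1) = pvReach m S := by
  unfold pvReach
  cases hmin : PySem.List.min? S (fun x => x) with
  | none =>
    show _ = max 0 m
    have hnil : S = [] := (PySem.List.min?_eq_none_iff S (fun x => x)).1 hmin
    rw [pvCountUntil_no_hit p 0 1 (m+1) (fun i hi₁ _ => by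
      by_contra hcon
      have : i ∈ S := (hS i).2 ⟨hi₁, by revert hcon; cases p i <;> simp⟩
      simp [hnil] at this)]
    omega
  | some d =>
    show _ = max 0 (min m (d - 1))
    have hdS : d ∈ S := PySem.List.min?_mem hmin
    have hd := (hS d).1 hdS
    have hlow : ∀ y ∈ S, d ≤ y := fun y hy => PySem.List.min?_isMin hmin y hy
    by_cases hdm : d ≤ m
    · rw [pvCountUntil_hit p 0 1 (m+1) d hd.1 (by omega) hd.2 (fun i hi₁ hi₂ => by
        by_contra hcon
        have : i ∈ S := (hS i).2 ⟨hi₁, by revert hcon; cases p i <;> simp⟩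
        have := hlow i this; omega)]
      omega
    · rw [pvCountUntil_no_hit p 0 1 (m+1) (fun i hi₁ hi₂ => by
        by_contra hcon
        have : i ∈ S := (hS i).2 ⟨hi₁, by revert hcon; cases p i <;> simp⟩
        have := hlow i this; omega)]
      omega

-- membership in B's comprehension for each direction
lemma pv_mem_up (walls : List (Int × Int)) (gx gy i : Int) :
    i ∈ walls.filterMap (fun w => if w.1 = gx ∧ w.2 < gy then some (gy - w.2) else none) ↔
      (1 ≤ i ∧ walls.contains (gx, gy - i) = true) := by
  simp only [List.mem_filterMap, List.contains_eq_mem, decide_eq_true_eq,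
    Option.ite_none_right_eq_some, Option.some.injEq]
  constructor
  · rintro ⟨⟨wx, wy⟩, hmem, ⟨⟨h1, h2⟩, h3⟩⟩
    simp only at h1 h2 h3
    refine ⟨by omega, ?_⟩
    have : (gx, gy - i) = (wx, wy) := by simp only [Prod.mk.injEq]; omega
    exact this ▸ hmem
  · rintro ⟨h1, hmem⟩
    exact ⟨(gx, gy - i), hmem, ⟨rfl, by omega⟩, by omega⟩

lemma pv_mem_down (walls : List (Int × Int)) (gx gy i : Int) :
    i ∈ walls.filterMap (fun w => if w.1 = gx ∧ gy < w.2 then some (w.2 - gy) else none) ↔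
      (1 ≤ i ∧ walls.contains (gx, gy + i) = true) := by
  simp only [List.mem_filterMap, List.contains_eq_mem, decide_eq_true_eq,
    Option.ite_none_right_eq_some, Option.some.injEq]
  constructor
  · rintro ⟨⟨wx, wy⟩, hmem, ⟨⟨h1, h2⟩, h3⟩⟩
    simp only at h1 h2 h3
    refine ⟨by omega, ?_⟩
    have : (gx, gy + i) = (wx, wy) := by simp only [Prod.mk.injEq]; omega
    exact this ▸ hmem
  · rintro ⟨h1, hmem⟩
    exact ⟨(gx, gy + i), hmem, ⟨rfl, by omega⟩, by omega⟩

lemma pv_mem_left (walls : List (Int × Int)) (gx gy i : Int) :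
    i ∈ walls.filterMap (fun w => if w.2 = gy ∧ w.1 < gx then some (gx - w.1) else none) ↔
      (1 ≤ i ∧ walls.contains (gx - i, gy) = true) := by
  simp only [List.mem_filterMap, List.contains_eq_mem, decide_eq_true_eq,
    Option.ite_none_right_eq_some, Option.some.injEq]
  constructor
  · rintro ⟨⟨wx, wy⟩, hmem, ⟨⟨h1, h2⟩, h3⟩⟩
    simp only at h1 h2 h3
    refine ⟨by omega, ?_⟩
    have : (gx - i, gy) = (wx, wy) := by simp only [Prod.mk.injEq]; omega
    exact this ▸ hmem
  · rintro ⟨h1, hmem⟩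
    exact ⟨(gx - i, gy), hmem, ⟨rfl, by omega⟩, by omega⟩

lemma pv_mem_right (walls : List (Int × Int)) (gx gy i : Int) :
    i ∈ walls.filterMap (fun w => if w.2 = gy ∧ gx < w.1 then some (w.1 - gx) else none) ↔
      (1 ≤ i ∧ walls.contains (gx + i, gy) = true) := by
  simp only [List.mem_filterMap, List.contains_eq_mem, decide_eq_true_eq,
    Option.ite_none_right_eq_some, Option.some.injEq]
  constructor
  · rintro ⟨⟨wx, wy⟩, hmem, ⟨⟨h1, h2⟩, h3⟩⟩
    simp only at h1 h2 h3
    refine ⟨by omega, ?_⟩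
    have : (gx + i, gy) = (wx, wy) := by simp only [Prod.mk.injEq]; omega
    exact this ▸ hmem
  · rintro ⟨h1, hmem⟩
    exact ⟨(gx + i, gy), hmem, ⟨rfl, by omega⟩, by omega⟩

-- ===== VERDICT (by name: the statement is the Claim_ definition above) =====
theorem get_explosion_range_spec : Claim_equal_get_explosion_range := by
  intro bomb_x bomb_y walls _
  unfold Spec_get_explosion_range get_explosion_range get_explosion_range_alt
  simp only
  refine Prod.ext ?_ (Prod.ext ?_ (Prod.ext ?_ ?_)) <;> simp only
  · exact pv_dir _ _ _ (pv_mem_up walls _ _)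
  · exact pv_dir _ _ _ (pv_mem_down walls _ _)
  · exact pv_dir _ _ _ (pv_mem_left walls _ _)
  · exact pv_dir _ _ _ (pv_mem_right walls _ _)
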